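-- pv_equiv track=rewrite | github.com/derangedhk417/ENGH-302-Research | src/analyze.py | read_dimensions_from_parentheses
-- ===== SOURCE A (Python) =====
-- def read_dimensions_from_parentheses(s):
--     if s.strip() == '-':
--         raise Exception()
--
--     chars = '0123456789.'
--     dims = ['']
--
--     idx              = 0
--     in_parentheses   = False
--     while idx < len(s):
--         if in_parentheses:
--             if s[idx] == ')':
--                 break
--             else:
--                 if s[idx] == 'x':
--                     dims.append('')
--                 elif s[idx] in chars:
--                     dims[-1] = dims[-1] + s[idx]
--         else:
--             if s[idx] == '(':
--                 in_parentheses = True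
--
--         idx += 1
--
--     return dims
-- ===== SOURCE B (Python) =====
-- def read_dimensions_from_parentheses(s):
--     if s.strip() == '-':
--         raise Exception()
--     _, _, tail = s.partition('(')
--     inner, _, _ = tail.partition(')')
--     return [''.join(c for c in part if c in '0123456789.') for part in inner.split('x')]
-- ===== Notes on version B (the rewrite author's own statement) =====
-- stated objective: simpler
-- what changed: Replaced the stateful index/while character scanner with a three-phase pipeline: partition at the first open paren, partition the tail at the first close paren, split the inner segment on the separator and keep only digit/dot characters in each part.
import Mathlib
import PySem

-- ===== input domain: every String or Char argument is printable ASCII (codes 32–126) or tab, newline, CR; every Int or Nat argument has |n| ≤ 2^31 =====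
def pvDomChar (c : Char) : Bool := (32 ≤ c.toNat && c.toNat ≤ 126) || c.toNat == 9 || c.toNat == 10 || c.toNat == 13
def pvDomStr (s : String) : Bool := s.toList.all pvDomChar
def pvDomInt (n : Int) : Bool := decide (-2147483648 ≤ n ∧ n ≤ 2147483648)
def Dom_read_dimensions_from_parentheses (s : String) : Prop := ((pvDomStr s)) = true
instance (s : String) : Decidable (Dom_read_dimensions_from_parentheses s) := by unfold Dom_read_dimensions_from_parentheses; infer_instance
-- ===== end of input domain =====

-- B replaces A's stateful index/while character scanner with a locate→slice→split→filter pipeline (objective: simpler).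

-- ===== PORT A =====
-- the constant 'chars' of A (also the membership test string of B)
def pvChars : List Char := "0123456789.".toList

-- A's while loop, in_parentheses = True phase: dims is kept as (finished groups, reversed) × current
-- last group; 'dims.append('')' pushes cur, 'dims[-1] = dims[-1] + s[idx]' appends to cur.
def pvA_in : List Char → List (List Char) → List Char → List (List Char)
  | [], acc, cur => (cur :: acc).reverse
  | c :: rest, acc, cur =>
    if c = ')' then (cur :: acc).reverse
    else if c = 'x' then pvA_in rest (cur :: acc) []
    else if c ∈ pvChars then pvA_in rest acc (cur ++ [c])
    else pvA_in rest acc cur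

-- A's while loop, in_parentheses = False phase: skip until '('.
def pvA_out : List Char → List (List Char)
  | [] => [[]]
  | c :: rest => if c = '(' then pvA_in rest [] [] else pvA_out rest

def read_dimensions_from_parentheses (s : String) : List String :=
  (pvA_out s.toList).map (fun l => String.ofList l)

-- ===== PORT B =====
-- inner.split('x') for the one-character separator 'x' (ported by hand; exact for a
-- single-character separator: each 'x' ends a group, ''.split('x') == ['']).
def pvSplitX : List Char → List (List Char)
  | [] => [[]]
  | c :: rest =>
    if c = 'x' then [] :: pvSplitX rest
    else
      match pvSplitX rest with
      | g :: gs => (c :: g) :: gs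
      | [] => [[c]]

def read_dimensions_from_parentheses_alt (s : String) : List String :=
  -- s.partition('(') : tail = everything after the first '(' ('' if none)
  let tail := (s.toList.dropWhile (· ≠ '(')).drop 1
  -- tail.partition(')') : inner = everything before the first ')' in tail
  let inner := tail.takeWhile (· ≠ ')')
  (pvSplitX inner).map (fun g => String.ofList (g.filter (· ∈ pvChars)))

-- ===== PRECONDITION & SPEC =====
-- Pre_ excludes exactly the inputs on which A raises (explicit 'raise Exception()'
-- when s.strip() == '-'); B raises there too.
def Pre_read_dimensions_from_parentheses (s : String) : Prop :=
  ¬ (PySem.Str.strip s = "-")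
instance (s : String) : Decidable (Pre_read_dimensions_from_parentheses s) := by
  unfold Pre_read_dimensions_from_parentheses; infer_instance

def pvWitness_read_dimensions_from_parentheses : String := "a (3x4.5) b"

def Spec_read_dimensions_from_parentheses (s : String) (out : List String) : Prop := out = read_dimensions_from_parentheses_alt s
instance (s : String) (out : List String) : Decidable (Spec_read_dimensions_from_parentheses s out) := by unfold Spec_read_dimensions_from_parentheses; infer_instance

-- ===== CLAIM (what is proved, stated in full; the proofs are below) =====
def Claim_equal_read_dimensions_from_parentheses : Prop := ∀ (s : String), Dom_read_dimensions_from_parentheses s → Pre_read_dimensions_from_parentheses s → Spec_read_dimensions_from_parentheses s (read_dimensions_from_parentheses s)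

-- ===== LEMMAS AND PROOFS =====

-- prepend cur to the first group of a split (proof-only helper)
def pvConsHead (cur : List Char) : List (List Char) → List (List Char)
  | [] => [cur]
  | g :: gs => (cur ++ g) :: gs

theorem pvSplitX_ne_nil (t : List Char) : pvSplitX t ≠ [] := by
  cases t with
  | nil => simp [pvSplitX]
  | cons c rest =>
    simp only [pvSplitX]
    split
    · simp
    · cases h : pvSplitX rest <;> simp

theorem pvConsHead_nil (l : List (List Char)) (h : l ≠ []) : pvConsHead [] l = l := by
  cases l with
  | nil => exact absurd rfl h
  | cons g gs => simp [pvConsHead]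

theorem pvSplitX_cons_ne (c : Char) (t : List Char) (hx : c ≠ 'x') (g : List Char)
    (gs : List (List Char)) (h : pvSplitX t = g :: gs) :
    pvSplitX (c :: t) = (c :: g) :: gs := by
  simp only [pvSplitX, if_neg hx, h]

theorem pvA_in_eq (cs : List Char) (acc : List (List Char)) (cur : List Char) :
    pvA_in cs acc cur =
      acc.reverse ++ pvConsHead cur
        ((pvSplitX (cs.takeWhile (· ≠ ')'))).map (fun g => g.filter (· ∈ pvChars))) := by
  induction cs generalizing acc cur with
  | nil => simp [pvA_in, pvSplitX, pvConsHead]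
  | cons c rest ih =>
    by_cases hrp : c = ')'
    · subst hrp
      simp [pvA_in, List.takeWhile, pvSplitX, pvConsHead]
    · by_cases hx : c = 'x'
      · subst hx
        rw [show pvA_in ('x' :: rest) acc cur = pvA_in rest (cur :: acc) [] by simp [pvA_in]]
        rw [ih]
        have htw : ('x' :: rest).takeWhile (· ≠ ')') = 'x' :: rest.takeWhile (· ≠ ')') := by
          simp [List.takeWhile]
        rw [htw]
        rw [show pvSplitX ('x' :: rest.takeWhile (· ≠ ')')) = [] :: pvSplitX (rest.takeWhile (· ≠ ')')) by simp [pvSplitX]]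
        rw [pvConsHead_nil _ (by simp [pvSplitX_ne_nil])]
        simp [pvConsHead]
      · have htw : (c :: rest).takeWhile (· ≠ ')') = c :: rest.takeWhile (· ≠ ')') := by
          simp [List.takeWhile, hrp]
        obtain ⟨g, gs, hsp⟩ : ∃ g gs, pvSplitX (rest.takeWhile (· ≠ ')')) = g :: gs := by
          cases h : pvSplitX (rest.takeWhile (· ≠ ')')) with
          | nil => exact absurd h (pvSplitX_ne_nil _)
          | cons a b => exact ⟨a, b, rfl⟩
        by_cases hc : c ∈ pvChars
        · rw [show pvA_in (c :: rest) acc cur = pvA_in rest acc (cur ++ [c]) by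
            simp [pvA_in, hrp, hx, hc]]
          rw [ih, htw, pvSplitX_cons_ne c _ hx g gs hsp, hsp]
          simp [pvConsHead, hc]
        · rw [show pvA_in (c :: rest) acc cur = pvA_in rest acc cur by
            simp [pvA_in, hrp, hx, hc]]
          rw [ih, htw, pvSplitX_cons_ne c _ hx g gs hsp, hsp]
          simp [pvConsHead, hc]

theorem pvA_out_eq (cs : List Char) :
    pvA_out cs =
      (pvSplitX (((cs.dropWhile (· ≠ '(')).drop 1).takeWhile (· ≠ ')'))).map
        (fun g => g.filter (· ∈ pvChars)) := by
  induction cs with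
  | nil => simp [pvA_out, pvSplitX]
  | cons c rest ih =>
    by_cases hc : c = '('
    · subst hc
      rw [show pvA_out ('(' :: rest) = pvA_in rest [] [] by simp [pvA_out]]
      rw [pvA_in_eq]
      rw [show ('(' :: rest).dropWhile (· ≠ '(') = '(' :: rest by simp [List.dropWhile]]
      simp only [List.drop_one, List.tail_cons, List.reverse_nil, List.nil_append]
      exact pvConsHead_nil _ (by simp [pvSplitX_ne_nil])
    · rw [show pvA_out (c :: rest) = pvA_out rest by simp [pvA_out, hc]]
      rw [show (c :: rest).dropWhile (· ≠ '(') = rest.dropWhile (· ≠ '(') by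
        simp [List.dropWhile, hc]]
      exact ih

-- ===== VERDICT (by name: the statement is the Claim_ definition above) =====
theorem read_dimensions_from_parentheses_spec : Claim_equal_read_dimensions_from_parentheses := by
  intro s _ _
  unfold Spec_read_dimensions_from_parentheses read_dimensions_from_parentheses
    read_dimensions_from_parentheses_alt
  rw [pvA_out_eq]
  simp
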